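-- pv_equiv track=rewrite | github.com/jamesjmnz/SALINIG | backend/app/infrastructure/graph/nodes/insight_node.py | _is_high_authority_domain
-- ===== SOURCE A (Python) =====
-- HIGH_AUTHORITY_DOMAINS = {
--     "apnews.com",
--     "bbc.com",
--     "cnn.com",
--     "pna.gov.ph",
--     "reuters.com",
--     "who.int",
--     "worldbank.org",
-- }
--
-- def _is_high_authority_domain(domain: str) -> bool:
--     domain = (domain or "").casefold()
--     if not domain:
--         return False
--     if domain.endswith(".gov") or ".gov." in domain or domain.endswith(".gov.ph") or ".gov.ph" in domain:
--         return True
--     if domain.endswith(".edu") or ".edu." in domain: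
--         return True
--     return any(domain == trusted or domain.endswith("." + trusted) for trusted in HIGH_AUTHORITY_DOMAINS)
-- ===== SOURCE B (Python) =====
-- HIGH_AUTHORITY_DOMAINS = {
--     "apnews.com",
--     "bbc.com",
--     "cnn.com",
--     "pna.gov.ph",
--     "reuters.com",
--     "who.int",
--     "worldbank.org",
-- }
--
-- def _is_high_authority_domain(domain: str) -> bool:
--     domain = (domain or "").casefold()
--     if not domain:
--         return False
--     parts = domain.split(".")
--     if "gov" in parts[1:] or "edu" in parts[1:]:
--         return True
--     return any(".".join(parts[i:]) in HIGH_AUTHORITY_DOMAINS for i in range(len(parts)))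
-- ===== Notes on version B (the rewrite author's own statement) =====
-- stated objective: simpler
-- what changed: B tokenizes the domain once into dot-separated labels and decides by label membership (gov/edu among the non-first labels) plus dot-boundary suffix joins looked up in the trusted set, replacing A's six separate endswith/substring probes.
import Mathlib
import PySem

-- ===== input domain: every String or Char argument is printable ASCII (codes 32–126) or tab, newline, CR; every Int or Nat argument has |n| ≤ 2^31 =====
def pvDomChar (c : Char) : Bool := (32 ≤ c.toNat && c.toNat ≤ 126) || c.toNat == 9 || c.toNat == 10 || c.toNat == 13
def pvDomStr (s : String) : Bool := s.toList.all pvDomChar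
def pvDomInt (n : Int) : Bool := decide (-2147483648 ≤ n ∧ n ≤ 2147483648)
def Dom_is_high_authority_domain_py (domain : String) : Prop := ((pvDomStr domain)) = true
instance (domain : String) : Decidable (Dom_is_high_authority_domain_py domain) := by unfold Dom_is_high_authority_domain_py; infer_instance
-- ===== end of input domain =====

-- B re-implements the check by tokenizing the domain once into dot-separated labels (label
-- membership + dot-boundary suffix joins) instead of A's repeated endswith/substring probes.

-- ===== PORT A =====
-- Python module constant HIGH_AUTHORITY_DOMAINS (a set of string literals; both programs only use
-- membership tests / `any` over it, so a fixed-order list of its distinct elements is exact).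
def HIGH_AUTHORITY_DOMAINS : List (List Char) :=
  ["apnews.com".toList, "bbc.com".toList, "cnn.com".toList, "pna.gov.ph".toList,
   "reuters.com".toList, "who.int".toList, "worldbank.org".toList]

-- Port of A. `.casefold()` is ported as `PySem.Chars.lower`, exact on the ASCII input domain.
def is_high_authority_domain_py (domain : String) : Bool :=
  let d := PySem.Chars.lower domain.toList
  if d = [] then false
  else if PySem.Chars.endswith d ".gov".toList || PySem.Chars.isIn ".gov.".toList d
      || PySem.Chars.endswith d ".gov.ph".toList || PySem.Chars.isIn ".gov.ph".toList d then true
  else if PySem.Chars.endswith d ".edu".toList || PySem.Chars.isIn ".edu.".toList d then true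
  else HIGH_AUTHORITY_DOMAINS.any (fun t => d == t || PySem.Chars.endswith d ('.' :: t))

-- ===== PORT B =====
-- Port of B (Source B). `.casefold()` is ported as `PySem.Chars.lower`, exact on the ASCII input domain.
def is_high_authority_domain_py_alt (domain : String) : Bool :=
  let d := PySem.Chars.lower domain.toList
  if d = [] then false
  else
    let parts := PySem.Chars.splitOn d ['.']
    if (parts.drop 1).contains "gov".toList || (parts.drop 1).contains "edu".toList then true
    else (List.range parts.length).any
      (fun i => HIGH_AUTHORITY_DOMAINS.contains (PySem.Chars.join ['.'] (parts.drop i)))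

-- ===== PRECONDITION & SPEC =====
def Spec_is_high_authority_domain_py (domain : String) (out : Bool) : Prop := out = is_high_authority_domain_py_alt domain
instance (domain : String) (out : Bool) : Decidable (Spec_is_high_authority_domain_py domain out) := by unfold Spec_is_high_authority_domain_py; infer_instance

-- ===== CLAIM (what is proved, stated in full; the proofs are below) =====
def Claim_equal_is_high_authority_domain_py : Prop := ∀ (domain : String), Dom_is_high_authority_domain_py domain → Spec_is_high_authority_domain_py domain (is_high_authority_domain_py domain)

-- ===== LEMMAS AND PROOFS =====

-- PySem's fuel-based split coincides with Mathlib's `List.splitOn` for the one-char separator '.'.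
lemma pv_splitOn_cons (c : Char) (rest : List Char) :
    (c :: rest).splitOn '.' = if c = '.' then [] :: rest.splitOn '.'
      else (rest.splitOn '.').modifyHead (List.cons c) := by
  simp [List.splitOn, List.splitOnP_cons]

lemma pv_splitOn_go_eq (fuel : Nat) (cs cur : List Char) (acc : List (List Char)) (h : cs.length ≤ fuel) :
    PySem.Chars.splitOn.go ['.'] fuel cs cur acc
      = acc.reverse ++ List.modifyHead (cur.reverse ++ ·) (cs.splitOn '.') := by
  induction fuel generalizing cs cur acc with
  | zero =>
    have hcs : cs = [] := List.eq_nil_of_length_eq_zero (Nat.le_zero.mp h)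
    subst hcs
    rw [PySem.Chars.splitOn.go.eq_def]
    simp [List.splitOn, List.splitOnP_nil]
  | succ n ih =>
    cases cs with
    | nil =>
      rw [PySem.Chars.splitOn.go.eq_def]
      simp [List.splitOn, List.splitOnP_nil]
    | cons c rest =>
      rw [PySem.Chars.splitOn.go.eq_def]
      by_cases hc : c = '.'
      · subst hc
        simp only [List.isPrefixOf, Bool.and_true, beq_self_eq_true, if_pos, List.length_cons,
          List.drop_succ_cons, List.length_nil, List.drop_zero]
        rw [ih rest [] _ (by simpa using Nat.le_of_succ_le_succ h)]
        rw [pv_splitOn_cons]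
        cases hq : rest.splitOn '.' <;> simp
      · have hp : (['.'].isPrefixOf (c :: rest)) = false := by
          simp [List.isPrefixOf]; exact fun h' => absurd h'.symm hc
        simp only [hp, Bool.false_eq_true, if_false]
        rw [ih rest (c :: cur) acc (by simpa using Nat.le_of_succ_le_succ h)]
        rw [pv_splitOn_cons, if_neg hc]
        cases hq : rest.splitOn '.' with
        | nil => simp
        | cons hh tt => simp

lemma pv_splitOn_eq (cs : List Char) :
    PySem.Chars.splitOn cs ['.'] = cs.splitOn '.' := by
  unfold PySem.Chars.splitOn
  rw [pv_splitOn_go_eq _ _ _ _ (by omega)]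
  cases h : cs.splitOn '.' <;> simp

-- labels produced by splitOn '.' contain no '.'
lemma pv_splitOn_dotfree (cs : List Char) : ∀ l ∈ cs.splitOn '.', '.' ∉ l := by
  induction cs with
  | nil => simp [List.splitOn, List.splitOnP_nil]
  | cons c rest ih =>
    intro l hl
    rw [pv_splitOn_cons] at hl
    by_cases hc : c = '.'
    · rw [if_pos hc] at hl
      rcases List.mem_cons.mp hl with rfl | hl
      · simp
      · exact ih l hl
    · rw [if_neg hc] at hl
      cases hq : rest.splitOn '.' with
      | nil => rw [hq] at hl; simp at hl
      | cons hh tt =>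
        rw [hq] at hl
        rcases List.mem_cons.mp hl with rfl | hl
        · intro hmem
          rcases List.mem_cons.mp hmem with h | h
          · exact hc h.symm
          · exact ih hh (by rw [hq]; simp) h
        · exact ih l (by rw [hq]; simp [hl])

lemma pv_ic_singleton (a : List Char) : List.intercalate ['.'] [a] = a := by
  simp [List.intercalate]

lemma pv_ic_cons (a : List Char) (ps : List (List Char)) (h : ps ≠ []) :
    List.intercalate ['.'] (a :: ps) = a ++ '.' :: List.intercalate ['.'] ps := by
  obtain ⟨b, ps', rfl⟩ := List.exists_cons_of_ne_nil h
  simp [List.intercalate, List.intersperse_cons₂]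

-- no dot-pattern fits inside a dot-free word
lemma pv_no_suffix {a t : List Char} (ha : '.' ∉ a) : ¬ ('.' :: t <:+ a) :=
  fun h => ha (h.subset (List.mem_cons_self))

lemma pv_no_infix {a t : List Char} (ha : '.' ∉ a) : ¬ ('.' :: t <:+: a) :=
  fun h => ha (h.subset (List.mem_cons_self))

lemma pv_no_prefix {a w : List Char} (ha : '.' ∉ a) : ¬ (w ++ ['.'] <+: a) :=
  fun h => ha (h.subset (by simp))

-- decompositions over a ++ '.' :: D'  (a dot-free)
lemma pv_suffix_decomp {a : List Char} (ha : '.' ∉ a) (D' t : List Char) :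
    ('.' :: t <:+ a ++ '.' :: D') ↔ (t = D' ∨ '.' :: t <:+ D') := by
  induction a with
  | nil => rw [List.nil_append, List.suffix_cons_iff]; simp
  | cons c a' ih =>
    have hc : c ≠ '.' := fun h => ha (by simp [h])
    have ha' : '.' ∉ a' := fun h => ha (by simp [h])
    rw [List.cons_append, List.suffix_cons_iff, ih ha']
    constructor
    · rintro (h | h)
      · exact absurd (List.head_eq_of_cons_eq h).symm hc
      · exact h
    · exact Or.inr

lemma pv_infix_decomp {a : List Char} (ha : '.' ∉ a) (D' pat : List Char) :
    ('.' :: pat <:+: a ++ '.' :: D') ↔ (pat <+: D' ∨ '.' :: pat <:+: D') := by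
  induction a with
  | nil => rw [List.nil_append, List.infix_cons_iff, List.cons_prefix_cons]; simp
  | cons c a' ih =>
    have hc : c ≠ '.' := fun h => ha (by simp [h])
    have ha' : '.' ∉ a' := fun h => ha (by simp [h])
    rw [List.cons_append, List.infix_cons_iff, List.cons_prefix_cons, ih ha']
    constructor
    · rintro (⟨h, _⟩ | h)
      · exact absurd h.symm hc
      · exact h
    · exact Or.inr

lemma pv_prefix_decomp {a : List Char} (ha : '.' ∉ a) (D' : List Char)
    {w : List Char} (hw : '.' ∉ w) :
    (w ++ ['.'] <+: a ++ '.' :: D') ↔ w = a := by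
  induction a generalizing w with
  | nil =>
    cases w with
    | nil => simp
    | cons c w' =>
      simp only [List.cons_append, List.nil_append, List.cons_prefix_cons]
      constructor
      · rintro ⟨rfl, -⟩; exact absurd (List.mem_cons_self) hw
      · rintro h; cases h
  | cons c a' ih =>
    have hc : c ≠ '.' := fun h => ha (by simp [h])
    have ha' : '.' ∉ a' := fun h => ha (by simp [h])
    cases w with
    | nil =>
      simp only [List.nil_append, List.cons_append, List.cons_prefix_cons]
      constructor
      · rintro ⟨h, -⟩; exact absurd h.symm hc
      · rintro h; cases h
    | cons e w' =>
      have hw' : '.' ∉ w' := fun h => hw (by simp [h])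
      simp only [List.cons_append, List.cons_prefix_cons, ih ha' hw']
      constructor
      · rintro ⟨rfl, rfl⟩; rfl
      · rintro h; cases h; exact ⟨rfl, rfl⟩

-- membership of a dot-free word among the labels, read off the glued string
lemma pv_mem_labels {ps : List (List Char)} (hne : ps ≠ []) (hdf : ∀ l ∈ ps, '.' ∉ l)
    {w : List Char} (hw : '.' ∉ w) :
    w ∈ ps ↔ (w ++ ['.'] <+: List.intercalate ['.'] ps ∨ w = List.intercalate ['.'] ps
      ∨ '.' :: w <:+ List.intercalate ['.'] ps ∨ '.' :: w ++ ['.'] <:+: List.intercalate ['.'] ps) := by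
  induction ps with
  | nil => exact absurd rfl hne
  | cons a ps' ih =>
    have hda : '.' ∉ a := hdf a (by simp)
    rcases eq_or_ne ps' [] with rfl | hps'
    · rw [pv_ic_singleton]
      simp only [List.mem_singleton]
      constructor
      · rintro rfl; exact Or.inr (Or.inl rfl)
      · rintro (h | rfl | h | h)
        · exact absurd h (pv_no_prefix hda)
        · rfl
        · exact absurd h (pv_no_suffix hda)
        · exact absurd h (pv_no_infix hda)
    · have hdf' : ∀ l ∈ ps', '.' ∉ l := fun l hl => hdf l (by simp [hl])
      rw [pv_ic_cons a ps' hps', pv_suffix_decomp hda, List.cons_append,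
        pv_infix_decomp hda, pv_prefix_decomp hda _ hw, List.mem_cons, ih hps' hdf']
      have hwD : w ≠ a ++ '.' :: List.intercalate ['.'] ps' := by
        rintro rfl; exact hw (by simp)
      tauto

-- dot-boundary suffixes of the glued string are exactly the joins of label tails
lemma pv_suffix_join {ps : List (List Char)} (hne : ps ≠ []) (hdf : ∀ l ∈ ps, '.' ∉ l)
    (t : List Char) :
    (List.intercalate ['.'] ps = t ∨ '.' :: t <:+ List.intercalate ['.'] ps)
      ↔ ∃ i < ps.length, List.intercalate ['.'] (ps.drop i) = t := by
  induction ps with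
  | nil => exact absurd rfl hne
  | cons a ps' ih =>
    have hda : '.' ∉ a := hdf a (by simp)
    rcases eq_or_ne ps' [] with rfl | hps'
    · simp only [pv_ic_singleton, List.length_singleton]
      constructor
      · rintro (rfl | h)
        · exact ⟨0, by omega, pv_ic_singleton a⟩
        · exact absurd h (pv_no_suffix hda)
      · rintro ⟨i, hi, hjoin⟩
        interval_cases i
        · exact Or.inl (by simpa [pv_ic_singleton] using hjoin)
    · have hdf' : ∀ l ∈ ps', '.' ∉ l := fun l hl => hdf l (by simp [hl])
      rw [pv_ic_cons a ps' hps', pv_suffix_decomp hda]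
      constructor
      · rintro (h | h | h)
        · exact ⟨0, by simp, by rw [List.drop_zero, pv_ic_cons a ps' hps']; exact h⟩
        · obtain ⟨i, hi, hj⟩ := (ih hps' hdf').mp (Or.inl h.symm)
          exact ⟨i + 1, by simpa using hi, by simpa using hj⟩
        · obtain ⟨i, hi, hj⟩ := (ih hps' hdf').mp (Or.inr h)
          exact ⟨i + 1, by simpa using hi, by simpa using hj⟩
      · rintro ⟨i, hi, hj⟩
        cases i with
        | zero => exact Or.inl (by rw [List.drop_zero, pv_ic_cons a ps' hps'] at hj; exact hj)
        | succ j =>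
          have hj' : List.intercalate ['.'] (ps'.drop j) = t := by simpa using hj
          have := (ih hps' hdf').mpr ⟨j, by simp at hi; omega, hj'⟩
          tauto

-- '.w' as suffix or '.w.' as substring  ⟺  w is a label other than the first
lemma pv_label_tail {ps : List (List Char)} (hne : ps ≠ []) (hdf : ∀ l ∈ ps, '.' ∉ l)
    {w : List Char} (hw : '.' ∉ w) :
    ('.' :: w <:+ List.intercalate ['.'] ps ∨ '.' :: w ++ ['.'] <:+: List.intercalate ['.'] ps)
      ↔ w ∈ ps.drop 1 := by
  rcases ps with _ | ⟨a, ps'⟩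
  · exact absurd rfl hne
  have hda : '.' ∉ a := hdf a (by simp)
  rcases eq_or_ne ps' [] with rfl | hps'
  · rw [pv_ic_singleton]
    simp only [List.drop_succ_cons, List.drop_zero, List.not_mem_nil, iff_false]
    rintro (h | h)
    · exact pv_no_suffix hda h
    · exact pv_no_infix hda h
  · have hdf' : ∀ l ∈ ps', '.' ∉ l := fun l hl => hdf l (by simp [hl])
    rw [pv_ic_cons a ps' hps', pv_suffix_decomp hda, List.cons_append, pv_infix_decomp hda,
      List.drop_succ_cons, List.drop_zero, pv_mem_labels hps' hdf' hw]
    tauto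

lemma pv_gram (cs : List Char)
    (w : List Char) (hw : '.' ∉ w) :
    (PySem.Chars.endswith cs ('.' :: w) || PySem.Chars.isIn ('.' :: w ++ ['.']) cs)
      = ((cs.splitOn '.').drop 1).contains w := by
  have hdf : ∀ l ∈ cs.splitOn '.', '.' ∉ l := pv_splitOn_dotfree cs
  have hnp : cs.splitOn '.' ≠ [] := List.splitOnP_ne_nil _ _
  have hic : List.intercalate ['.'] (cs.splitOn '.') = cs := List.intercalate_splitOn cs '.'
  have h := pv_label_tail hnp hdf hw
  rw [hic] at h
  apply Bool.coe_iff_coe.mp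
  rw [Bool.or_eq_true, PySem.Chars.endswith_iff, PySem.Chars.isIn_iff_infix,
    List.contains_iff_mem]
  exact h

lemma pv_main (domain : String) :
    is_high_authority_domain_py domain = is_high_authority_domain_py_alt domain := by
  unfold is_high_authority_domain_py is_high_authority_domain_py_alt
  set cs := PySem.Chars.lower domain.toList with hcsdef
  by_cases hnil : cs = []
  · simp [hnil]
  · rw [if_neg hnil, if_neg hnil, pv_splitOn_eq]
    have hne : cs.splitOn '.' ≠ [] := List.splitOnP_ne_nil _ _
    have hdf : ∀ l ∈ cs.splitOn '.', '.' ∉ l := pv_splitOn_dotfree cs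
    have hic : List.intercalate ['.'] (cs.splitOn '.') = cs := List.intercalate_splitOn cs '.'
    -- the four gov probes collapse to the two with suffix ".gov" / substring ".gov."
    have hred : (PySem.Chars.endswith cs ".gov".toList || PySem.Chars.isIn ".gov.".toList cs
        || PySem.Chars.endswith cs ".gov.ph".toList || PySem.Chars.isIn ".gov.ph".toList cs)
        = (PySem.Chars.endswith cs ".gov".toList || PySem.Chars.isIn ".gov.".toList cs) := by
      apply Bool.coe_iff_coe.mp
      simp only [Bool.or_eq_true, PySem.Chars.endswith_iff, PySem.Chars.isIn_iff_infix]
      have hsub : (".gov.".toList : List Char) <:+: ".gov.ph".toList := by decide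
      constructor
      · rintro (((h | h) | h) | h)
        · exact Or.inl h
        · exact Or.inr h
        · exact Or.inr (hsub.trans h.isInfix)
        · exact Or.inr (hsub.trans h)
      · rintro (h | h)
        · exact Or.inl (Or.inl (Or.inl h))
        · exact Or.inl (Or.inl (Or.inr h))
    have hgov : (PySem.Chars.endswith cs ".gov".toList || PySem.Chars.isIn ".gov.".toList cs)
        = ((cs.splitOn '.').drop 1).contains "gov".toList := by
      have := pv_gram cs "gov".toList (by decide)
      rwa [show ('.' :: "gov".toList : List Char) = ".gov".toList from rfl,
        show (".gov".toList ++ ['.'] : List Char) = ".gov.".toList from rfl] at this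
    have hedu : (PySem.Chars.endswith cs ".edu".toList || PySem.Chars.isIn ".edu.".toList cs)
        = ((cs.splitOn '.').drop 1).contains "edu".toList := by
      have := pv_gram cs "edu".toList (by decide)
      rwa [show ('.' :: "edu".toList : List Char) = ".edu".toList from rfl,
        show (".edu".toList ++ ['.'] : List Char) = ".edu.".toList from rfl] at this
    have hany : HIGH_AUTHORITY_DOMAINS.any (fun t => cs == t || PySem.Chars.endswith cs ('.' :: t))
        = (List.range (cs.splitOn '.').length).any
            (fun i => HIGH_AUTHORITY_DOMAINS.contains (PySem.Chars.join ['.'] ((cs.splitOn '.').drop i))) := by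
      apply Bool.coe_iff_coe.mp
      simp only [List.any_eq_true, Bool.or_eq_true, beq_iff_eq, PySem.Chars.endswith_iff,
        List.mem_range, List.contains_iff_mem, PySem.Chars.join]
      constructor
      · rintro ⟨t, htH, hcase⟩
        obtain ⟨i, hi, hj⟩ := (pv_suffix_join hne hdf t).mp (by rw [hic]; exact hcase)
        exact ⟨i, hi, hj ▸ htH⟩
      · rintro ⟨i, hi, hmem⟩
        refine ⟨_, hmem, ?_⟩
        have := (pv_suffix_join hne hdf _).mpr ⟨i, hi, rfl⟩
        rwa [hic] at this
    rw [hred, hgov, hedu, hany]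
    have hiff : ∀ (b1 b2 r : Bool),
        (if b1 then true else if b2 then true else r) = (if b1 || b2 then true else r) := by decide
    exact hiff _ _ _

-- ===== VERDICT (by name: the statement is the Claim_ definition above) =====
theorem is_high_authority_domain_py_spec : Claim_equal_is_high_authority_domain_py := by
  intro domain _
  exact pv_main domain
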